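-- pv_equiv track=rewrite | github.com/ethanc-ec/Wordle-Solver | Solver.py | bestword
-- ===== SOURCE A (Python) =====
-- from collections import defaultdict
--
-- def bestword(words):
--     """
--     Takes in a list of words, finds the best word based on sum of occurrences of each letter
--     Needs work, weights for various parts
--     """
--     if len(words) == 1:
--         return words
--     charhashmap = defaultdict(lambda:0)
--     for word in words:
--         for char in word:
--             charhashmap[char] += 1
--     curmax = 0
--     dupemax = 0
--     maxval = set()
--     maxwithdupes = set()
--     for word in words:
--         word = word[:5]
--         summ = 0
--         for char in word:
--             summ += charhashmap[char]
--         if len(set(list(word))) < len(word):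
--             if summ > dupemax:
--                 dupemax = summ
--                 maxwithdupes = set([word])
--             elif summ == dupemax:
--                 maxwithdupes.add(word)
--         else:
--             if summ > curmax:
--                 curmax = summ
--                 maxval = set([word])
--             elif summ == curmax:
--                 maxval.add(word)
--     return maxval.union(maxwithdupes)
-- ===== SOURCE B (Python) =====
-- from collections import Counter
--
-- def bestword(words):
--     """Invert the problem: bucket truncated words by score in two dicts
--     (no-dupe / with-dupe) and read off the bucket at the max key --
--     no running max or max-then-filter scan."""
--     if len(words) == 1:
--         return words
--     counts = Counter("".join(words))
--     plain, dupes = {}, {}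
--     for w in words:
--         t = w[:5]
--         s = sum(counts[c] for c in t)
--         bucket = dupes if len(set(t)) < len(t) else plain
--         bucket.setdefault(s, []).append(t)
--     best = set()
--     for bucket in (plain, dupes):
--         if bucket:
--             best.update(bucket[max(bucket)])
--     return best
-- ===== Notes on version B (the rewrite author's own statement) =====
-- stated objective: alternative
-- what changed: Replaces A's online fold that tracks a running max and argmax-set per dupe/no-dupe group by an inverted index: one pass buckets each truncated word into a dict keyed by its score (one dict per group), and the winners are simply the bucket at the max key of each non-empty dict - no score comparisons during the word pass and no max-then-filter scan.
import Mathlib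
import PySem

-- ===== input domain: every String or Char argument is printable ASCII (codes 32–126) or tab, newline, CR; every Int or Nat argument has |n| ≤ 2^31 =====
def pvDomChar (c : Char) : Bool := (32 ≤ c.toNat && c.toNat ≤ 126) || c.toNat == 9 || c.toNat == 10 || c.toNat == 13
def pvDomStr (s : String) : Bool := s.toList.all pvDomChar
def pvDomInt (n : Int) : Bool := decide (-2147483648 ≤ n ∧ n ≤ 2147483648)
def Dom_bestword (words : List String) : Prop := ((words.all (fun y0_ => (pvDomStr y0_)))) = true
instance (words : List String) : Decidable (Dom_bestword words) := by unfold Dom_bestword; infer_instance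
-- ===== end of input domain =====

-- B replaces A's online fold tracking a running max and argmax-set per dupe/no-dupe group by an
-- inverted index: score-keyed bucket dicts, winners = the bucket at the max key (objective: alternative).
-- (A only mutates its own local defaultdict — reading a missing key inserts the default 0, which never changes any value read — so the ports are value-faithful.)

-- ===== PORT A =====
-- A's locals as helper defs: charhashmap (defaultdict counting loop) …
def pvHm (words : List String) : PySem.Dict Char Int :=
  words.foldl (fun d w => w.toList.foldl (fun d c => d.modify c 0 (· + 1)) d) PySem.Dict.empty
-- … and A's main loop carrying (curmax, dupemax, maxval, maxwithdupes); word = word[:5], summ recomputed per word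
def pvLoop (words : List String) : Int × Int × PySem.Set String × PySem.Set String :=
  words.foldl
    (fun (st : Int × Int × PySem.Set String × PySem.Set String) word =>
      let t := PySem.List.slice word.toList none (some 5)
      let summ := t.foldl (fun s c => s + (pvHm words).getD c 0) 0
      if (PySem.Set.ofList t).length < t.length then
        if summ > st.2.1 then (st.1, summ, st.2.2.1, PySem.Set.ofList [String.ofList t])
        else if summ = st.2.1 then (st.1, st.2.1, st.2.2.1, PySem.Set.add st.2.2.2 (String.ofList t))
        else st
      else
        if summ > st.1 then (summ, st.2.1, PySem.Set.ofList [String.ofList t], st.2.2.2)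
        else if summ = st.1 then (st.1, st.2.1, PySem.Set.add st.2.2.1 (String.ofList t), st.2.2.2)
        else st)
    ((0 : Int), (0 : Int), (PySem.Set.empty : PySem.Set String), (PySem.Set.empty : PySem.Set String))

def bestword (words : List String) : List String :=
  if words.length = 1 then words
  else PySem.Set.union (pvLoop words).2.2.1 (pvLoop words).2.2.2

-- ===== PORT B =====
-- Source B's counts = Counter("".join(words))
def pvCountsB (words : List String) : PySem.Dict Char Int :=
  PySem.Dict.counter (PySem.Str.join "" words).toList
-- Source B's bucketing loop over words, carrying the pair of dicts (plain, dupes):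
-- bucket = dupes if dupe else plain; bucket.setdefault(s, []).append(t)
def pvPair (words : List String) : PySem.Dict Int (List String) × PySem.Dict Int (List String) :=
  words.foldl
    (fun (st : PySem.Dict Int (List String) × PySem.Dict Int (List String)) w =>
      let t := PySem.List.slice w.toList none (some 5)
      let s := t.foldl (fun a c => a + (pvCountsB words).getD c 0) 0
      if (PySem.Set.ofList t).length < t.length
      then (st.1, st.2.modify s [] (· ++ [String.ofList t]))
      else (st.1.modify s [] (· ++ [String.ofList t]), st.2))
    (PySem.Dict.empty, PySem.Dict.empty)
-- Source B's 'if bucket: best.update(bucket[max(bucket)])' (max(bucket) iterates the keys;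
-- the looked-up key is max(bucket) ∈ keys, so bucket[…] cannot raise — getD is exact there)
def pvCollect (best : PySem.Set String) (b : PySem.Dict Int (List String)) : PySem.Set String :=
  if b.size = 0 then best
  else
    match PySem.List.max? b.keys (fun x => x) with
    | none => best
    | some m => PySem.Set.update best (b.getD m [])

def bestword_alt (words : List String) : List String :=
  if words.length = 1 then words
  else pvCollect (pvCollect PySem.Set.empty (pvPair words).1) (pvPair words).2

-- ===== PRECONDITION & SPEC =====
def Spec_bestword (words : List String) (out : List String) : Prop := out = bestword_alt words
instance (words : List String) (out : List String) : Decidable (Spec_bestword words out) := by unfold Spec_bestword; infer_instance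

-- ===== CLAIM (what is proved, stated in full; the proofs are below) =====
def Claim_equal_bestword : Prop := ∀ (words : List String), Dom_bestword words → Spec_bestword words (bestword words)

-- ===== LEMMAS AND PROOFS =====
-- proof-side abbreviations: truncation, truncated word, score, dupe flag, running max, argmax set,
-- winner list, grouping dict
def pvT (w : String) : List Char := PySem.List.slice w.toList none (some 5)
def pvTr (w : String) : String := String.ofList (pvT w)
def pvF (words : List String) (w : String) : Int :=
  (pvT w).foldl (fun s c => s + (((words.flatMap String.toList).count c : Nat) : Int)) 0
def pvP (w : String) : Bool := decide ((PySem.Set.ofList (pvT w)).length < (pvT w).length)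
def pvM (f : String → Int) (g : List String) : Int := g.foldl (fun a w => max a (f w)) 0
def pvW (f : String → Int) (tr : String → String) (g : List String) : List String :=
  (g.filter (fun w => f w == pvM f g)).map tr
def pvG (f : String → Int) (tr : String → String) (g : List String) : PySem.Dict Int (List String) :=
  g.foldl (fun d w => d.modify (f w) [] (· ++ [tr w])) PySem.Dict.empty

-- A's defaultdict holds, at each char, its count over all the words
theorem pvCounts (ws : List String) (d : PySem.Dict Char Int) (c : Char) :
    (ws.foldl (fun d w => w.toList.foldl (fun d c => d.modify c 0 (· + 1)) d) d).getD c 0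
      = d.getD c 0 + ((ws.flatMap String.toList).count c : Int) := by
  induction ws generalizing d with
  | nil => simp
  | cons w ws ih =>
    simp only [List.foldl_cons, List.flatMap_cons, List.count_append, ih,
      PySem.Dict.getD_foldl_modify_add_one]
    push_cast; ring

theorem pvF_nonneg (words : List String) (w : String) : 0 ≤ pvF words w := by
  unfold pvF
  rw [PySem.List.foldl_add]
  simp only [zero_add]
  apply List.sum_nonneg
  intro x hx
  simp only [List.mem_map] at hx
  obtain ⟨c, -, rfl⟩ := hx
  positivity

theorem pvM_append (f : String → Int) (g : List String) (x : String) :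
    pvM f (g ++ [x]) = max (pvM f g) (f x) := by
  simp [pvM, List.foldl_append]

theorem pvM_le (f : String → Int) (g : List String) : ∀ w ∈ g, f w ≤ pvM f g :=
  (PySem.List.le_foldl_max_int g f 0).2

theorem pvW_append_gt (f : String → Int) (tr : String → String) (g : List String) (x : String)
    (h : pvM f g < f x) : pvW f tr (g ++ [x]) = [tr x] := by
  unfold pvW
  rw [pvM_append, max_eq_right h.le, List.filter_append]
  have h1 : g.filter (fun w => f w == f x) = [] := by
    rw [List.filter_eq_nil_iff]
    intro w hw
    simp only [beq_iff_eq]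
    exact fun he => absurd h (by rw [← he]; exact not_lt.mpr (pvM_le f g w hw))
  simp [h1]

theorem pvW_append_eq (f : String → Int) (tr : String → String) (g : List String) (x : String)
    (h : f x = pvM f g) : pvW f tr (g ++ [x]) = pvW f tr g ++ [tr x] := by
  unfold pvW
  rw [pvM_append, max_eq_left h.le, List.filter_append]
  simp [h]

theorem pvW_append_lt (f : String → Int) (tr : String → String) (g : List String) (x : String)
    (h : f x < pvM f g) : pvW f tr (g ++ [x]) = pvW f tr g := by
  unfold pvW
  rw [pvM_append, max_eq_left h.le, List.filter_append]
  have h1 : [x].filter (fun w => f w == pvM f g) = [] := by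
    simp [beq_iff_eq, ne_of_lt h]
  simp [h1]

-- the invariant of A's loop: per group, the running max and the set of its achievers
theorem pvFold4 (f : String → Int) (p : String → Bool) (tr : String → String) (ws : List String) :
    ws.foldl
      (fun (st : Int × Int × PySem.Set String × PySem.Set String) w =>
        if p w then
          (if f w > st.2.1 then (st.1, f w, st.2.2.1, PySem.Set.ofList [tr w])
           else if f w = st.2.1 then (st.1, st.2.1, st.2.2.1, PySem.Set.add st.2.2.2 (tr w))
           else st)
        else
          (if f w > st.1 then (f w, st.2.1, PySem.Set.ofList [tr w], st.2.2.2)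
           else if f w = st.1 then (st.1, st.2.1, PySem.Set.add st.2.2.1 (tr w), st.2.2.2)
           else st))
      ((0 : Int), (0 : Int), (PySem.Set.empty : PySem.Set String), (PySem.Set.empty : PySem.Set String))
    = (pvM f (ws.filter (fun w => !p w)), pvM f (ws.filter p),
       (PySem.Set.ofList (pvW f tr (ws.filter (fun w => !p w))) : PySem.Set String),
       (PySem.Set.ofList (pvW f tr (ws.filter p)) : PySem.Set String)) := by
  induction ws using List.reverseRecOn with
  | nil => simp [pvM, pvW, PySem.Set.empty]
  | append_singleton ws x ih =>
    rw [List.foldl_append, ih, List.filter_append, List.filter_append]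
    simp only [List.foldl_cons, List.foldl_nil]
    by_cases hp : p x
    · rw [if_pos hp]
      simp only [List.filter_cons, List.filter_nil, hp, Bool.not_true, if_pos,
        Bool.false_eq_true, ite_false, List.append_nil]
      rcases lt_trichotomy (pvM f (ws.filter p)) (f x) with hgt | heqr | hlt
      · rw [if_pos hgt, pvM_append, max_eq_right hgt.le, pvW_append_gt f tr _ _ hgt]
      · rw [if_neg (by omega), if_pos heqr.symm, pvM_append, max_eq_left heqr.ge,
          pvW_append_eq f tr _ _ heqr.symm, PySem.Set.ofList_append_singleton]
      · rw [if_neg (by omega), if_neg (by omega), pvM_append, max_eq_left hlt.le,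
          pvW_append_lt f tr _ _ hlt]
    · rw [if_neg hp]
      simp only [List.filter_cons, List.filter_nil, hp, Bool.not_false, if_pos,
        Bool.false_eq_true, ite_false, List.append_nil]
      rcases lt_trichotomy (pvM f (ws.filter (fun w => !p w))) (f x) with hgt | heqr | hlt
      · rw [if_pos hgt, pvM_append, max_eq_right hgt.le, pvW_append_gt f tr _ _ hgt]
      · rw [if_neg (by omega), if_pos heqr.symm, pvM_append, max_eq_left heqr.ge,
          pvW_append_eq f tr _ _ heqr.symm, PySem.Set.ofList_append_singleton]
      · rw [if_neg (by omega), if_neg (by omega), pvM_append, max_eq_left hlt.le,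
          pvW_append_lt f tr _ _ hlt]

theorem pvLoop_eq (words : List String) :
    pvLoop words = (pvM (pvF words) (words.filter (fun w => !pvP w)), pvM (pvF words) (words.filter pvP),
      PySem.Set.ofList (pvW (pvF words) pvTr (words.filter (fun w => !pvP w))),
      PySem.Set.ofList (pvW (pvF words) pvTr (words.filter pvP))) := by
  have hc : ∀ c : Char, (pvHm words).getD c 0 = (((words.flatMap String.toList).count c : Nat) : Int) := by
    intro c; unfold pvHm; rw [pvCounts]; simp
  unfold pvLoop
  refine Eq.trans (PySem.List.foldl_congr_mem _ _ _ _ ?_) (pvFold4 (pvF words) pvP pvTr words)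
  intro st w _
  simp only [hc, pvP, pvF, pvT, pvTr, decide_eq_true_eq]

-- A's return value, named: union of the two winner sets
theorem pvA_eq (words : List String) (h : ¬ words.length = 1) :
    bestword words
      = PySem.Set.update (PySem.Set.update PySem.Set.empty
          (pvW (pvF words) pvTr (words.filter (fun w => !pvP w))))
          (pvW (pvF words) pvTr (words.filter pvP)) := by
  unfold bestword
  rw [if_neg h, pvLoop_eq]
  show PySem.Set.update (PySem.Set.ofList _) (PySem.Set.ofList _) = _
  rw [show (PySem.Set.empty : PySem.Set String) = [] from rfl, PySem.Set.update_nil_left]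
  -- updating with a list or with its dedup (ofList) appends the same new elements
  rw [PySem.Set.update_eq_append_filter, PySem.Set.update_eq_append_filter,
    PySem.Set.ofList_ofList]

-- Source B's Counter agrees with A's defaultdict char counts
theorem pvCountsB_eq (words : List String) (c : Char) :
    (pvCountsB words).getD c 0 = (((words.flatMap String.toList).count c : Nat) : Int) := by
  unfold pvCountsB
  rw [PySem.Dict.getD_counter]
  have hj : (PySem.Str.join "" words).toList = words.flatMap String.toList := by
    simp only [PySem.Str.toList_join]
    have : ∀ parts : List (List Char), PySem.Chars.join [] parts = parts.flatten := by
      intro parts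
      induction parts with
      | nil => rfl
      | cons p ps ih =>
        cases ps with
        | nil => simp [PySem.Chars.join, List.intercalate]
        | cons q qs =>
          simp only [PySem.Chars.join, List.intercalate] at *
          simp [List.intersperse] at *
          simp [ih]
    show PySem.Chars.join "".toList (words.map String.toList) = _
    rw [show "".toList = ([] : List Char) from rfl, this, List.flatMap_def]
  rw [hj]

-- the conditional pair-of-dicts fold splits into one grouping fold per group
theorem pvPairFold (f : String → Int) (p : String → Bool) (tr : String → String)
    (ws : List String) (d₁ d₂ : PySem.Dict Int (List String)) :
    ws.foldl
      (fun (st : PySem.Dict Int (List String) × PySem.Dict Int (List String)) w =>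
        if p w then (st.1, st.2.modify (f w) [] (· ++ [tr w]))
        else (st.1.modify (f w) [] (· ++ [tr w]), st.2))
      (d₁, d₂)
    = ((ws.filter (fun w => !p w)).foldl (fun d w => d.modify (f w) [] (· ++ [tr w])) d₁,
       (ws.filter p).foldl (fun d w => d.modify (f w) [] (· ++ [tr w])) d₂) := by
  induction ws generalizing d₁ d₂ with
  | nil => simp
  | cons w ws ih =>
    simp only [List.foldl_cons, List.filter_cons]
    by_cases hp : p w
    · simp only [hp, if_pos, Bool.not_true, Bool.false_eq_true, ite_false, ih, List.foldl_cons]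
    · simp only [hp, Bool.false_eq_true, ite_false, Bool.not_false, if_pos, ih, List.foldl_cons]

theorem pvPair_eq (words : List String) :
    pvPair words = (pvG (pvF words) pvTr (words.filter (fun w => !pvP w)),
                    pvG (pvF words) pvTr (words.filter pvP)) := by
  unfold pvPair
  have h1 : words.foldl
      (fun (st : PySem.Dict Int (List String) × PySem.Dict Int (List String)) w =>
        let t := PySem.List.slice w.toList none (some 5)
        let s := t.foldl (fun a c => a + (pvCountsB words).getD c 0) 0
        if (PySem.Set.ofList t).length < t.length
        then (st.1, st.2.modify s [] (· ++ [String.ofList t]))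
        else (st.1.modify s [] (· ++ [String.ofList t]), st.2))
      (PySem.Dict.empty, PySem.Dict.empty)
    = words.foldl
      (fun (st : PySem.Dict Int (List String) × PySem.Dict Int (List String)) w =>
        if pvP w then (st.1, st.2.modify (pvF words w) [] (· ++ [pvTr w]))
        else (st.1.modify (pvF words w) [] (· ++ [pvTr w]), st.2))
      (PySem.Dict.empty, PySem.Dict.empty) := by
    refine PySem.List.foldl_congr_mem _ _ _ _ ?_
    intro st w _
    simp only [pvCountsB_eq, pvP, pvF, pvT, pvTr, decide_eq_true_eq]
  rw [h1, pvPairFold]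
  rfl

-- the grouping dict, read back: its keys are the distinct scores, a bucket is the
-- in-order list of truncated words with that score
theorem pvG_keys (f : String → Int) (tr : String → String) (g : List String) :
    (pvG f tr g).keys = PySem.Set.ofList (g.map f) := by
  unfold pvG
  rw [PySem.Dict.keys_foldl_modify_key (key := f) (d0 := []) (f := fun _ w => (· ++ [tr w]))]
  simp [PySem.Set.update_nil_left, PySem.Dict.keys_empty]

theorem pvG_getD (f : String → Int) (tr : String → String) (g : List String) (m : Int) :
    (pvG f tr g).getD m [] = (g.filter (fun w => f w == m)).map tr := by
  unfold pvG
  have h : g.foldl (fun d w => d.modify (f w) [] (· ++ [tr w])) PySem.Dict.empty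
      = (g.map (fun w => (f w, tr w))).foldl (fun d p => d.modify p.1 [] (· ++ [p.2]))
          PySem.Dict.empty := by
    rw [List.foldl_map]
  rw [h, PySem.Dict.getD_foldl_modify_append]
  simp [List.filter_map, List.map_map, Function.comp_def]

-- the max of a nonempty group's score keys is A's running max pvM (scores are ≥ 0)
theorem pvMaxKey (f : String → Int) (g : List String)
    (hf : ∀ w ∈ g, 0 ≤ f w) (m : Int)
    (hm : m ∈ g.map f) (hmax : ∀ y ∈ g.map f, y ≤ m) : m = pvM f g := by
  have hM : pvM f g = (g.map f).foldl max 0 := by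
    rw [List.foldl_map]; rfl
  apply le_antisymm
  · rw [hM]
    exact (PySem.List.le_foldl_max (g.map f) 0).2 m hm
  · rw [hM]
    rcases PySem.List.foldl_max_mem (g.map f) 0 with h0 | hmem
    · rw [h0]
      obtain ⟨w, hw, rfl⟩ := List.mem_map.mp hm
      exact hf w hw
    · exact hmax _ hmem

-- Source B's per-group read-off equals updating with A's winner list
theorem pvCollect_eq (words : List String) (best : PySem.Set String) (g : List String) :
    pvCollect best (pvG (pvF words) pvTr g)
      = PySem.Set.update best (pvW (pvF words) pvTr g) := by
  unfold pvCollect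
  have hkeys := pvG_keys (pvF words) pvTr g
  have hsize : (pvG (pvF words) pvTr g).size = (pvG (pvF words) pvTr g).keys.length := by
    show (pvG (pvF words) pvTr g).items.length = ((pvG (pvF words) pvTr g).items.map (·.1)).length
    rw [List.length_map]
  by_cases hg : g = []
  · subst hg
    have : (pvG (pvF words) pvTr ([] : List String)).size = 0 := by
      rw [hsize, hkeys]; rfl
    rw [if_pos this]
    simp [pvW, PySem.Set.update_nil]
  · have hkne : (pvG (pvF words) pvTr g).keys ≠ [] := by
      rw [hkeys]
      obtain ⟨w, ws, rfl⟩ := List.exists_cons_of_ne_nil hg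
      intro hcon
      have : pvF words w ∈ PySem.Set.ofList ((w :: ws).map (pvF words)) := by
        rw [PySem.Set.mem_ofList]; simp
      rw [hcon] at this
      exact absurd this (List.not_mem_nil)
    have hsne : ¬ (pvG (pvF words) pvTr g).size = 0 := by
      rw [hsize]
      intro hcon
      exact hkne (List.eq_nil_of_length_eq_zero hcon)
    rw [if_neg hsne]
    rcases hmax : PySem.List.max? (pvG (pvF words) pvTr g).keys (fun x => x) with _ | m
    · rw [PySem.List.max?_eq_none_iff] at hmax
      exact absurd hmax hkne
    · have hmem : m ∈ g.map (pvF words) := by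
        have := PySem.List.max?_mem hmax
        rw [hkeys, PySem.Set.mem_ofList] at this
        exact this
      have hisMax : ∀ y ∈ g.map (pvF words), y ≤ m := by
        intro y hy
        have hy' : y ∈ (pvG (pvF words) pvTr g).keys := by
          rw [hkeys, PySem.Set.mem_ofList]; exact hy
        exact PySem.List.max?_isMax hmax y hy'
      have hm : m = pvM (pvF words) g :=
        pvMaxKey (pvF words) g (fun w _ => pvF_nonneg words w) m hmem hisMax
      show best.update ((pvG (pvF words) pvTr g).getD m []) = _
      rw [pvG_getD, hm]
      rfl

-- ===== VERDICT (by name: the statement is the Claim_ definition above) =====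
theorem bestword_spec : Claim_equal_bestword := by
  intro words _
  unfold Spec_bestword
  by_cases h : words.length = 1
  · unfold bestword bestword_alt
    rw [if_pos h, if_pos h]
  · rw [pvA_eq words h]
    unfold bestword_alt
    rw [if_neg h, pvPair_eq]
    simp only []
    rw [pvCollect_eq, pvCollect_eq]
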